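-- pv_equiv track=rewrite | github.com/hallamlab/TreeSAPP | treesapp/auto_itol_colours_style.py | convert_clades_to_ranges
-- ===== SOURCE A (Python) =====
-- from collections import namedtuple
--
-- def convert_clades_to_ranges(taxa_clades: dict, leaf_order: list) -> dict:
--     taxa_ranges = dict()
--     for taxon in taxa_clades:
--         taxa_ranges[taxon] = []
--         for clade_leaves in taxa_clades[taxon]:
--             if len(clade_leaves) > 1:
--                 positions = clade_leaf_sides(clade_leaves, leaf_order)
--                 taxa_ranges[taxon].append([positions.left, positions.right])
--             else:
--                 taxa_ranges[taxon].append(clade_leaves)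
--     return taxa_ranges
--
-- def clade_leaf_sides(clade_leaves, leaf_order: list) -> namedtuple:
--     positions = namedtuple("positions",
--                            ["left", "right"])
--     indices = dict()
--     for leaf in clade_leaves:
--         indices[leaf_order.index(leaf)] = leaf
--     p = positions
--     p.left = indices[min(indices.keys())]
--     p.right = indices[max(indices.keys())]
--     return p
-- ===== SOURCE B (Python) =====
-- def convert_clades_to_ranges(taxa_clades: dict, leaf_order: list) -> dict:
--     # Instead of locating each clade leaf's index, walk leaf_order itself once per clade:
--     # the clade's left/right ends are simply the first and last entries of leaf_order
--     # that belong to the clade.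
--     taxa_ranges = {}
--     for taxon, clades in taxa_clades.items():
--         rows = []
--         for clade_leaves in clades:
--             if len(clade_leaves) > 1:
--                 members = set(clade_leaves)
--                 present = [leaf for leaf in leaf_order if leaf in members]
--                 rows.append([present[0], present[-1]])
--             else:
--                 rows.append(clade_leaves)
--         taxa_ranges[taxon] = rows
--     return taxa_ranges
-- ===== Notes on version B (the rewrite author's own statement) =====
-- stated objective: alternative
-- what changed: B inverts the traversal: instead of A's per-leaf leaf_order.index scans building an index->leaf table reduced by min/max over its keys, B filters leaf_order once per clade against a set of the clade's leaves and takes the first and last surviving entries.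
import Mathlib
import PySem

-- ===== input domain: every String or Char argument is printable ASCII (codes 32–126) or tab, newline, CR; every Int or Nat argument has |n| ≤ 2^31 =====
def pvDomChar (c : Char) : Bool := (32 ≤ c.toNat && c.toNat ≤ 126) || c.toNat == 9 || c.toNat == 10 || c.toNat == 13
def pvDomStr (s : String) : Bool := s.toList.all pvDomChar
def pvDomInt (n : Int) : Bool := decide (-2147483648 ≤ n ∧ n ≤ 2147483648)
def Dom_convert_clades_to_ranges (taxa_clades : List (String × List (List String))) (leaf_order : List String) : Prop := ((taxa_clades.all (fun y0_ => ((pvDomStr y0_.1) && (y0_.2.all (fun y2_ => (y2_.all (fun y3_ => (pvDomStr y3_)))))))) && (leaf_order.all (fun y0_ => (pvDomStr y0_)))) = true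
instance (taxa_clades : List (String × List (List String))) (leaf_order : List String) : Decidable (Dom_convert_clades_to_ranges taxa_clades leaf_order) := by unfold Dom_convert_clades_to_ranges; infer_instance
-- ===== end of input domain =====

-- B inverts the traversal: instead of indexing every clade leaf into leaf_order and reducing an
-- index->leaf table by min/max over its keys, B filters leaf_order against the clade's leaf set
-- and takes the first and last surviving entries (alternative decomposition, same cost class).
-- ===== PORT A =====
-- leaf_order.index(leaf) as an Int; ValueError (index? = none) is excluded by Pre_, so the
-- .getD 0 default is never reached on admitted inputs
def leafIndexVal (leaf_order : List String) (leaf : String) : Int :=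
  (((PySem.List.index? leaf_order leaf).getD 0 : Nat) : Int)

def clade_leaf_sides (clade_leaves : List String) (leaf_order : List String) : String × String :=
  -- indices[leaf_order.index(leaf)] = leaf; min/max over indices.keys, then the two lookups.
  -- min/max of an empty dict raise in Python, but clade_leaf_sides is only called on clades of
  -- length > 1, so the .getD defaults below are never reached on admitted inputs
  let indices : PySem.Dict Int String :=
    clade_leaves.foldl (fun d leaf => d.insert (leafIndexVal leaf_order leaf) leaf) PySem.Dict.empty
  let left := indices.getD ((PySem.List.min? indices.keys (fun x => x)).getD 0) ""
  let right := indices.getD ((PySem.List.max? indices.keys (fun x => x)).getD 0) ""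
  (left, right)

def convert_clades_to_ranges (taxa_clades : List (String × List (List String))) (leaf_order : List String) : List (String × List (List String)) :=
  -- 'for taxon in taxa_clades: taxa_ranges[taxon] = []; for clade_leaves in taxa_clades[taxon]: …'
  -- iterated over the assoc list's entries (on the dict Python actually receives, entry value and
  -- lookup coincide; re-inserting [] first makes a repeated key behave like Python's merged dict)
  let taxa_ranges : PySem.Dict String (List (List String)) :=
    taxa_clades.foldl (fun tr p =>
      let tr := tr.insert p.1 []
      p.2.foldl (fun tr clade_leaves =>
        if clade_leaves.length > 1 then
          let positions := clade_leaf_sides clade_leaves leaf_order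
          tr.modify p.1 [] (fun l => l ++ [[positions.1, positions.2]])
        else
          tr.modify p.1 [] (fun l => l ++ [clade_leaves])) tr) PySem.Dict.empty
  taxa_ranges.items

-- ===== PORT B =====
def convert_clades_to_ranges_alt (taxa_clades : List (String × List (List String))) (leaf_order : List String) : List (String × List (List String)) :=
  -- present[0] / present[-1] raise IndexError when no clade leaf occurs in leaf_order; Pre_
  -- guarantees every leaf of a multi-leaf clade is in leaf_order, so the .getD defaults are
  -- never reached on admitted inputs
  let taxa_ranges : PySem.Dict String (List (List String)) :=
    taxa_clades.foldl (fun tr p =>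
      let rows := p.2.foldl (fun rows clade_leaves =>
        if clade_leaves.length > 1 then
          let members := PySem.Set.ofList clade_leaves
          let present := leaf_order.filter (fun leaf => PySem.Set.contains members leaf)
          rows ++ [[(PySem.List.pyGet? present 0).getD "", (PySem.List.pyGet? present (-1)).getD ""]]
        else rows ++ [clade_leaves]) []
      tr.insert p.1 rows) PySem.Dict.empty
  taxa_ranges.items

-- ===== PRECONDITION & SPEC =====
-- Pre_ excludes inputs where a multi-leaf clade has a leaf missing from leaf_order (A raises
-- ValueError there) and inputs where leaf_order lists a leaf of a multi-leaf clade more than once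
-- (a leaf order with repeated leaves is degenerate; A's first-occurrence indexing and B's
-- last-occurrence scan are equally accidental choices there — see the cite in claim.json).
def Pre_convert_clades_to_ranges (taxa_clades : List (String × List (List String))) (leaf_order : List String) : Prop :=
  ∀ p ∈ taxa_clades, ∀ clade ∈ p.2, clade.length > 1 → ∀ leaf ∈ clade, leaf_order.count leaf = 1
instance (taxa_clades : List (String × List (List String))) (leaf_order : List String) : Decidable (Pre_convert_clades_to_ranges taxa_clades leaf_order) := by unfold Pre_convert_clades_to_ranges; infer_instance
def pvWitness_convert_clades_to_ranges : (List (String × List (List String))) × List String :=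
  ([("t1", [["a", "c"], ["b"]]), ("t2", [["d", "a", "b"]])], ["a", "b", "c", "d"])

def Spec_convert_clades_to_ranges (taxa_clades : List (String × List (List String))) (leaf_order : List String) (out : List (String × List (List String))) : Prop := out = convert_clades_to_ranges_alt taxa_clades leaf_order
instance (taxa_clades : List (String × List (List String))) (leaf_order : List String) (out : List (String × List (List String))) : Decidable (Spec_convert_clades_to_ranges taxa_clades leaf_order out) := by unfold Spec_convert_clades_to_ranges; infer_instance

-- ===== CLAIM (what is proved, stated in full; the proofs are below) =====
def Claim_equal_convert_clades_to_ranges : Prop := ∀ (taxa_clades : List (String × List (List String))) (leaf_order : List String), Dom_convert_clades_to_ranges taxa_clades leaf_order → Pre_convert_clades_to_ranges taxa_clades leaf_order → Spec_convert_clades_to_ranges taxa_clades leaf_order (convert_clades_to_ranges taxa_clades leaf_order)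

-- ===== LEMMAS AND PROOFS =====

lemma leafIndexVal_inj (lo : List String) (a b : String) (ha : a ∈ lo) (hb : b ∈ lo)
    (h : leafIndexVal lo a = leafIndexVal lo b) : a = b := by
  obtain ⟨ka, hka⟩ := Option.isSome_iff_exists.mp ((PySem.List.index?_isSome_iff lo a).mpr ha)
  obtain ⟨kb, hkb⟩ := Option.isSome_iff_exists.mp ((PySem.List.index?_isSome_iff lo b).mpr hb)
  obtain ⟨hlt_a, hga, -⟩ := PySem.List.getElem_of_index?_eq_some hka
  obtain ⟨hlt_b, hgb, -⟩ := PySem.List.getElem_of_index?_eq_some hkb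
  have : ka = kb := by
    simp only [leafIndexVal] at h
    rw [hka, hkb] at h
    exact_mod_cast h
  subst this
  rw [← hga, ← hgb]

lemma get?_foldl_insert_of_ne (f : String → Int) :
    ∀ (cl : List String) (d : PySem.Dict Int String) (k : Int), (∀ a ∈ cl, f a ≠ k) →
      (cl.foldl (fun d leaf => d.insert (f leaf) leaf) d).get? k = d.get? k := by
  intro cl
  induction cl with
  | nil => intro d k _; rfl
  | cons c t ih =>
    intro d k h
    simp only [List.foldl_cons]
    rw [ih _ _ (fun a ha => h a (List.mem_cons_of_mem _ ha))]
    exact PySem.Dict.get?_insert_of_ne _ _ (fun hk => h c (List.mem_cons_self) hk.symm)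

lemma A_get (f : String → Int) :
    ∀ (cl : List String) (d : PySem.Dict Int String) (leaf : String), leaf ∈ cl →
      (∀ a ∈ cl, f a = f leaf → a = leaf) →
      (cl.foldl (fun d leaf => d.insert (f leaf) leaf) d).get? (f leaf) = some leaf := by
  intro cl
  induction cl with
  | nil => intro d leaf h; exact absurd h (List.not_mem_nil)
  | cons c t ih =>
    intro d leaf hmem hinj
    simp only [List.foldl_cons]
    by_cases ht : leaf ∈ t
    · exact ih _ _ ht (fun a ha => hinj a (List.mem_cons_of_mem _ ha))
    · have hc : leaf = c := by
        rcases List.mem_cons.mp hmem with h | h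
        · exact h
        · exact absurd h ht
      subst hc
      rw [get?_foldl_insert_of_ne f t _ _ (fun a ha hfa => ht (by rw [← hinj a (List.mem_cons_of_mem _ ha) hfa]; exact ha))]
      exact PySem.Dict.get?_insert_self _ _ _

-- two distinct occurrences of the same value force count ≥ 2
lemma count_ge_two_of_two_pos (lo : List String) (v : String) (i j : Nat) (hij : i < j)
    (hj : j < lo.length) (hi : lo[i]'(Nat.lt_trans hij hj) = v) (hjv : lo[j] = v) :
    2 ≤ lo.count v := by
  have h1 : v ∈ lo.take j := by
    have ht : (lo.take j)[i]'(by simp; omega) = lo[i]'(Nat.lt_trans hij hj) :=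
      List.getElem_take
    rw [← hi, ← ht]
    exact List.getElem_mem _
  have h2 : v ∈ lo.drop j := by
    have hd : (lo.drop j)[0]'(by simp; omega) = lo[j] := by simp [List.getElem_drop]
    rw [← hjv, ← hd]
    exact List.getElem_mem _
  have : 2 ≤ (lo.take j).count v + (lo.drop j).count v :=
    Nat.add_le_add (List.count_pos_iff.mpr h1) (List.count_pos_iff.mpr h2)
  calc 2 ≤ (lo.take j).count v + (lo.drop j).count v := this
    _ = lo.count v := by rw [← List.count_append, List.take_append_drop]

-- head of a filter whose first passing element sits at position k
lemma filter_head_of (P : String → Bool) :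
    ∀ (lo : List String) (k : Nat) (hk : k < lo.length),
      (∀ j (hj : j < k), P (lo[j]'(Nat.lt_trans hj hk)) = false) → P (lo[k]) = true →
      (lo.filter P).head? = some lo[k] := by
  intro lo
  induction lo with
  | nil => intro k hk; exact absurd hk (by simp)
  | cons x t ih =>
    intro k hk hbefore hhit
    cases k with
    | zero =>
      simp only [List.getElem_cons_zero] at hhit ⊢
      simp [hhit]
    | succ k' =>
      have hx : P x = false := hbefore 0 (Nat.succ_pos k')
      simp only [List.getElem_cons_succ] at hhit ⊢
      rw [List.filter_cons, if_neg (by simp [hx])]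
      exact ih k' (by simpa using Nat.lt_of_succ_lt_succ hk)
        (fun j hj => by simpa using hbefore (j + 1) (Nat.succ_lt_succ hj)) hhit

-- last element of a filter whose last passing element sits at position k
lemma filter_getLast_of (P : String → Bool) (lo : List String) (k : Nat) (hk : k < lo.length)
    (hafter : ∀ j (hj : j < lo.length), k < j → P (lo[j]) = false) (hhit : P (lo[k]) = true) :
    (lo.filter P).getLast? = some lo[k] := by
  rw [← List.head?_reverse, ← List.filter_reverse]
  have hk' : lo.length - 1 - k < lo.reverse.length := by simp; omega
  have hb : ∀ j (hj : j < lo.length - 1 - k), P (lo.reverse[j]'(Nat.lt_trans hj hk')) = false := by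
    intro j hj
    rw [List.getElem_reverse]
    exact hafter (lo.length - 1 - j) (by omega) (by omega)
  have hval : lo.reverse[lo.length - 1 - k]'hk' = lo[k] := by
    rw [List.getElem_reverse]
    congr 1
    omega
  rw [filter_head_of P lo.reverse (lo.length - 1 - k) hk' hb (by rw [hval]; exact hhit), hval]

-- the per-clade row each program appends, written with each port's own expressions
def rowA (lo : List String) (c : List String) : List String :=
  if c.length > 1 then [(clade_leaf_sides c lo).1, (clade_leaf_sides c lo).2] else c

def rowB (lo : List String) (c : List String) : List String :=
  if c.length > 1 then
    let members := PySem.Set.ofList c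
    let present := lo.filter (fun leaf => PySem.Set.contains members leaf)
    [(PySem.List.pyGet? present 0).getD "", (PySem.List.pyGet? present (-1)).getD ""]
  else c

lemma row_eq (lo : List String) (c : List String)
    (hcnt : c.length > 1 → ∀ leaf ∈ c, lo.count leaf = 1) : rowA lo c = rowB lo c := by
  by_cases hc : c.length > 1
  · have hcount := hcnt hc
    have hsub : ∀ leaf ∈ c, leaf ∈ lo := fun leaf hl =>
      List.count_pos_iff.mp (by rw [hcount leaf hl]; omega)
    have hne : c ≠ [] := by intro h; rw [h] at hc; simp at hc
    simp only [rowA, rowB, if_pos hc]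
    set g := leafIndexVal lo with hg
    set D := c.foldl (fun d leaf => d.insert (g leaf) leaf)
      (PySem.Dict.empty : PySem.Dict Int String) with hD
    set P : String → Bool := fun leaf => PySem.Set.contains (PySem.Set.ofList c) leaf with hP
    have hPmem : ∀ leaf, P leaf = true ↔ leaf ∈ c := by
      intro leaf
      rw [hP]
      rw [PySem.Set.contains_iff, PySem.Set.mem_ofList]
    set present := lo.filter P with hpres
    have hinj : ∀ a ∈ c, ∀ b ∈ c, g a = g b → a = b :=
      fun a ha b hb h => leafIndexVal_inj lo a b (hsub a ha) (hsub b hb) h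
    have hkeys : D.keys = PySem.Set.ofList (c.map g) := by
      rw [hD, PySem.Dict.keys_foldl_insert_key (key := g) (f := fun _ leaf => leaf)]
      simp only [PySem.Dict.keys_empty]
      rfl
    have hmemkeys : ∀ k, k ∈ D.keys ↔ ∃ a ∈ c, g a = k := by
      intro k
      rw [hkeys, PySem.Set.mem_ofList]
      exact List.mem_map
    -- g leaf is the (unique) position of leaf in lo, as a Nat
    have hpos : ∀ leaf ∈ c, ∃ k : Nat, ∃ hk : k < lo.length, lo[k] = leaf ∧ g leaf = (k : Int) ∧
        (∀ j (hj : j < k), lo[j]'(Nat.lt_trans hj hk) ≠ leaf) := by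
      intro leaf hl
      obtain ⟨k, hk⟩ := Option.isSome_iff_exists.mp
        ((PySem.List.index?_isSome_iff lo leaf).mpr (hsub leaf hl))
      obtain ⟨hlt, hval, hmin⟩ := PySem.List.getElem_of_index?_eq_some hk
      exact ⟨k, hlt, hval, by rw [hg]; unfold leafIndexVal; rw [hk]; rfl, hmin⟩
    have hkeys_ne : D.keys ≠ [] := by
      obtain ⟨a, ha⟩ := List.exists_mem_of_ne_nil c hne
      intro h
      have := (hmemkeys (g a)).mpr ⟨a, ha, rfl⟩
      rw [h] at this
      exact List.not_mem_nil this
    obtain ⟨m, hm⟩ : ∃ m, PySem.List.min? D.keys (fun x => x) = some m := by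
      cases hmin : PySem.List.min? D.keys (fun x => x) with
      | none => exact absurd ((PySem.List.min?_eq_none_iff _ _).mp hmin) hkeys_ne
      | some m => exact ⟨m, rfl⟩
    obtain ⟨M, hM⟩ : ∃ M, PySem.List.max? D.keys (fun x => x) = some M := by
      cases hmax : PySem.List.max? D.keys (fun x => x) with
      | none => exact absurd ((PySem.List.max?_eq_none_iff _ _).mp hmax) hkeys_ne
      | some M => exact ⟨M, rfl⟩
    obtain ⟨a, ha, hga⟩ := (hmemkeys m).mp (PySem.List.min?_mem hm)
    obtain ⟨b, hb, hgb⟩ := (hmemkeys M).mp (PySem.List.max?_mem hM)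
    have hmin_le : ∀ leaf ∈ c, m ≤ g leaf := fun leaf hl =>
      PySem.List.min?_isMin hm (g leaf) ((hmemkeys (g leaf)).mpr ⟨leaf, hl, rfl⟩)
    have hle_max : ∀ leaf ∈ c, g leaf ≤ M := fun leaf hl =>
      PySem.List.max?_isMax hM (g leaf) ((hmemkeys (g leaf)).mpr ⟨leaf, hl, rfl⟩)
    -- A's left/right are the dict lookups at m and M
    have hgeta : D.get? m = some a := by
      rw [← hga, hD]
      exact A_get g c PySem.Dict.empty a ha (fun x hx h => hinj x hx a ha h)
    have hgetb : D.get? M = some b := by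
      rw [← hgb, hD]
      exact A_get g c PySem.Dict.empty b hb (fun x hx h => hinj x hx b hb h)
    -- B's head/last of the filtered leaf_order are a and b
    obtain ⟨ka, hka_lt, hka_val, hka_g, hka_min⟩ := hpos a ha
    obtain ⟨kb, hkb_lt, hkb_val, hkb_g, -⟩ := hpos b hb
    have hhead : present.head? = some a := by
      rw [hpres, ← hka_val]
      apply filter_head_of P lo ka hka_lt
      · intro j hj
        by_contra hPj
        simp only [Bool.not_eq_false] at hPj
        have hjc : lo[j]'(Nat.lt_trans hj hka_lt) ∈ c := (hPmem _).mp hPj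
        obtain ⟨kj, hkj_lt, hkj_val, hkj_g, hkj_min⟩ := hpos _ hjc
        have hkj_le : kj ≤ j := by
          by_contra hgt
          exact hkj_min j (by omega) rfl
        have hm_le := hmin_le _ hjc
        rw [hkj_g] at hm_le
        have hmk : m = (ka : Int) := by rw [← hga, hka_g]
        omega
      · rw [hka_val]; exact (hPmem a).mpr ha
    have hlast : present.getLast? = some b := by
      rw [hpres, ← hkb_val]
      apply filter_getLast_of P lo kb hkb_lt
      · intro j hj hgt
        by_contra hPj
        simp only [Bool.not_eq_false] at hPj
        have hjc : lo[j] ∈ c := (hPmem _).mp hPj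
        obtain ⟨kj, hkj_lt, hkj_val, hkj_g, -⟩ := hpos _ hjc
        have hle := hle_max _ hjc
        rw [hkj_g] at hle
        have hMk : M = (kb : Int) := by rw [← hgb, hkb_g]
        have hkj_lt_j : kj < j := by omega
        have h2 : 2 ≤ lo.count lo[j] :=
          count_ge_two_of_two_pos lo lo[j] kj j hkj_lt_j hj hkj_val rfl
        have h1 := hcount _ hjc
        omega
      · rw [hkb_val]; exact (hPmem b).mpr hb
    have hpresne : present ≠ [] := by
      intro h
      rw [h] at hhead
      simp at hhead
    -- assemble
    show ((clade_leaf_sides c lo).1 :: (clade_leaf_sides c lo).2 :: []) = _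
    have hsides : clade_leaf_sides c lo = (a, b) := by
      show (D.getD ((PySem.List.min? D.keys (fun x => x)).getD 0) "",
            D.getD ((PySem.List.max? D.keys (fun x => x)).getD 0) "") = (a, b)
      rw [hm, hM]
      simp only [Option.getD_some]
      rw [PySem.Dict.getD_of_get?_eq_some _ "" hgeta, PySem.Dict.getD_of_get?_eq_some _ "" hgetb]
    rw [hsides]
    have h0 : (PySem.List.pyGet? present 0).getD "" = a := by
      have : PySem.List.pyGet? present 0 = present.head? := by
        cases present with
        | nil => rfl
        | cons x t => simp [PySem.List.pyGet?, PySem.List.pyIdx?]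
      rw [this, hhead]
      rfl
    have h1 : (PySem.List.pyGet? present (-1)).getD "" = b := by
      rw [PySem.List.pyGet?_neg_one, hlast]
      rfl
    rw [h0, h1]
  · simp only [rowA, rowB, if_neg hc]

lemma A_inner (row : List String → List String) (k : String) :
    ∀ (clades : List (List String)) (tr : PySem.Dict String (List (List String))) (l : List (List String)),
      clades.foldl (fun tr c => tr.modify k [] (fun L => L ++ [row c])) (tr.insert k l)
        = tr.insert k (l ++ clades.map row) := by
  intro clades
  induction clades with
  | nil => intro tr l; simp
  | cons c t ih =>
    intro tr l
    simp only [List.foldl_cons, List.map_cons]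
    have hmod : (tr.insert k l).modify k [] (fun L => L ++ [row c]) = tr.insert k (l ++ [row c]) := by
      show ((tr.insert k l).insert k (((tr.insert k l).getD k []) ++ [row c])) = tr.insert k (l ++ [row c])
      rw [PySem.Dict.getD_insert_self, PySem.Dict.insert_insert_self]
    rw [hmod, ih]
    simp

-- ===== VERDICT (by name: the statement is the Claim_ definition above) =====
theorem convert_clades_to_ranges_spec : Claim_equal_convert_clades_to_ranges := by
  intro tc lo _ hpre
  unfold Spec_convert_clades_to_ranges
  show convert_clades_to_ranges tc lo = convert_clades_to_ranges_alt tc lo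
  simp only [convert_clades_to_ranges, convert_clades_to_ranges_alt]
  congr 1
  have hA : ∀ (tr : PySem.Dict String (List (List String))) (p : String × List (List String)), p ∈ tc →
      (p.2.foldl (fun tr clade_leaves =>
        if clade_leaves.length > 1 then
          let positions := clade_leaf_sides clade_leaves lo
          tr.modify p.1 [] (fun l => l ++ [[positions.1, positions.2]])
        else tr.modify p.1 [] (fun l => l ++ [clade_leaves])) (tr.insert p.1 []))
      = tr.insert p.1 (p.2.map (rowA lo)) := by
    intro tr p _
    have hcongr : p.2.foldl (fun tr clade_leaves =>
        if clade_leaves.length > 1 then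
          let positions := clade_leaf_sides clade_leaves lo
          tr.modify p.1 [] (fun l => l ++ [[positions.1, positions.2]])
        else tr.modify p.1 [] (fun l => l ++ [clade_leaves])) (tr.insert p.1 [])
      = p.2.foldl (fun tr c => tr.modify p.1 [] (fun L => L ++ [rowA lo c])) (tr.insert p.1 []) := by
      apply PySem.List.foldl_congr_mem
      intro acc c _
      simp only [rowA]
      split_ifs <;> rfl
    rw [hcongr, A_inner]
    simp
  have hB : ∀ (p : String × List (List String)), p ∈ tc →
      (p.2.foldl (fun rows clade_leaves =>
        if clade_leaves.length > 1 then
          let members := PySem.Set.ofList clade_leaves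
          let present := lo.filter (fun leaf => PySem.Set.contains members leaf)
          rows ++ [[(PySem.List.pyGet? present 0).getD "", (PySem.List.pyGet? present (-1)).getD ""]]
        else rows ++ [clade_leaves]) ([] : List (List String)))
      = p.2.map (rowB lo) := by
    intro p _
    have hcongr : ∀ (acc : List (List String)) (c : List String), c ∈ p.2 →
        (if c.length > 1 then
          let members := PySem.Set.ofList c
          let present := lo.filter (fun leaf => PySem.Set.contains members leaf)
          acc ++ [[(PySem.List.pyGet? present 0).getD "", (PySem.List.pyGet? present (-1)).getD ""]]
        else acc ++ [c]) = acc ++ [rowB lo c] := by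
      intro acc c _
      simp only [rowB]
      split_ifs <;> rfl
    refine Eq.trans (PySem.List.foldl_congr_mem _ _
      (fun acc c => acc ++ [rowB lo c]) _ (fun acc c hc => hcongr acc c hc)) ?_
    rw [PySem.List.foldl_append_singleton_eq_map]
    simp
  refine Eq.trans (PySem.List.foldl_congr_mem _ _
      (fun tr p => tr.insert p.1 (p.2.map (rowA lo))) _ (fun tr p hp => hA tr p hp)) ?_
  refine Eq.trans ?_ (Eq.symm (PySem.List.foldl_congr_mem _ _
      (fun tr p => tr.insert p.1 (p.2.map (rowB lo))) _ (fun tr p hp => by rw [hB p hp])))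
  apply PySem.List.foldl_congr_mem
  intro tr p hp
  congr 1
  apply List.map_congr_left
  intro c hc
  exact row_eq lo c (fun hlen leaf hleaf => hpre p hp c hc hlen leaf hleaf)
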